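-- pv_equiv track=rewrite | github.com/k-harada/AtCoder | ADT/20240319/D.py | solve
-- ===== SOURCE A (Python) =====
-- def solve(n, d_list):
--     res = 0
--     for i in range(1, n + 1):
--         d = d_list[i - 1]
--         if 1 <= i <= 9:
--             if i <= d:
--                 res += 1
--             if i * 11 <= d:
--                 res += 1
--         elif i % 11 == 0:
--             j = i // 11
--             if j <= d:
--                 res += 1
--             if j * 11 <= d:
--                 res += 1
--     return res
-- ===== SOURCE B (Python) =====
-- def solve(n, d_list):
--     res = 0
--     for i in range(1, min(n, 9) + 1):
--         d = d_list[i - 1]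
--         res += (i <= d) + (i * 11 <= d)
--     for j in range(1, n // 11 + 1):
--         d = d_list[11 * j - 1]
--         res += (j <= d) + (j * 11 <= d)
--     return res
-- ===== Notes on version B (the rewrite author's own statement) =====
-- stated objective: faster
-- what changed: Instead of scanning every index 1..n and testing which branch applies, B enumerates only the contributing indices directly: i=1..min(n,9) and the multiples of 11 via their quotient j=1..n//11, so it reads about n/11+9 list elements instead of n.
import Mathlib
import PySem

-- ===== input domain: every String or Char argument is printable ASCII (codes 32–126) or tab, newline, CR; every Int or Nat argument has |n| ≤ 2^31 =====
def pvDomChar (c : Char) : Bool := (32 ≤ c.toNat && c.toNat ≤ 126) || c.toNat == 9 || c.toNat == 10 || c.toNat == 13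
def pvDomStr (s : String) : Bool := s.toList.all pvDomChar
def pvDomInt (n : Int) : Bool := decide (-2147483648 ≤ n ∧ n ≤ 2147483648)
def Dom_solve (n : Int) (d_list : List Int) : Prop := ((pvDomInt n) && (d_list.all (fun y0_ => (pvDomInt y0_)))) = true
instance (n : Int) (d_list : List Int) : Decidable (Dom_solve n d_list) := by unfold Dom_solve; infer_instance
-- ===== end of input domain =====

-- B enumerates only the contributing indices (1..9 and multiples of 11 via their quotient)
-- instead of scanning every index 1..n; return-value equivalence on Pre_ (n ≤ len(d_list)).

-- ===== PORT A =====
-- literal transliteration of A: one pass i = 1..n, branch on i ≤ 9 / i % 11 == 0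
def solve (n : Int) (d_list : List Int) : Int :=
  (PySem.List.pyRange 1 (n + 1) 1).foldl (fun res i =>
    let d := PySem.List.pyGetD d_list (i - 1) 0
    if 1 ≤ i ∧ i ≤ 9 then
      let res := if i ≤ d then res + 1 else res
      if i * 11 ≤ d then res + 1 else res
    else if PySem.Int.mod i 11 = 0 then
      let j := PySem.Int.floordiv i 11
      let res := if j ≤ d then res + 1 else res
      if j * 11 ≤ d then res + 1 else res
    else res) 0

-- ===== PORT B =====
-- literal transliteration of B: two short loops over the only contributing indices
def solve_alt (n : Int) (d_list : List Int) : Int :=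
  let res := (PySem.List.pyRange 1 (min n 9 + 1) 1).foldl (fun res i =>
    let d := PySem.List.pyGetD d_list (i - 1) 0
    res + ((if i ≤ d then 1 else 0) + (if i * 11 ≤ d then 1 else 0))) 0
  (PySem.List.pyRange 1 (PySem.Int.floordiv n 11 + 1) 1).foldl (fun res j =>
    let d := PySem.List.pyGetD d_list (11 * j - 1) 0
    res + ((if j ≤ d then 1 else 0) + (if j * 11 ≤ d then 1 else 0))) res

-- ===== PRECONDITION & SPEC =====
-- Pre_ excludes exactly the inputs where A raises IndexError (it reads d_list[i-1] for every i = 1..n)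
def Pre_solve (n : Int) (d_list : List Int) : Prop := n ≤ (d_list.length : Int)
instance (n : Int) (d_list : List Int) : Decidable (Pre_solve n d_list) := by unfold Pre_solve; infer_instance
def pvWitness_solve : Int × List Int := (3, [2, 5, 33])

def Spec_solve (n : Int) (d_list : List Int) (out : Int) : Prop := out = solve_alt n d_list
instance (n : Int) (d_list : List Int) (out : Int) : Decidable (Spec_solve n d_list out) := by unfold Spec_solve; infer_instance

-- ===== CLAIM (what is proved, stated in full; the proofs are below) =====
def Claim_equal_solve : Prop := ∀ (n : Int) (d_list : List Int), Dom_solve n d_list → Pre_solve n d_list → Spec_solve n d_list (solve n d_list)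
-- ===== LEMMAS AND PROOFS =====

-- per-index contribution of A's loop body
def contribA (d_list : List Int) (i : Int) : Int :=
  let d := PySem.List.pyGetD d_list (i - 1) 0
  if 1 ≤ i ∧ i ≤ 9 then (if i ≤ d then 1 else 0) + (if i * 11 ≤ d then 1 else 0)
  else if PySem.Int.mod i 11 = 0 then
    (if PySem.Int.floordiv i 11 ≤ d then 1 else 0) + (if PySem.Int.floordiv i 11 * 11 ≤ d then 1 else 0)
  else 0

def contribB1 (d_list : List Int) (i : Int) : Int :=
  (if i ≤ PySem.List.pyGetD d_list (i - 1) 0 then 1 else 0) + (if i * 11 ≤ PySem.List.pyGetD d_list (i - 1) 0 then 1 else 0)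

def contribB2 (d_list : List Int) (j : Int) : Int :=
  (if j ≤ PySem.List.pyGetD d_list (11 * j - 1) 0 then 1 else 0) + (if j * 11 ≤ PySem.List.pyGetD d_list (11 * j - 1) 0 then 1 else 0)

lemma foldl_eq_sum_map (f : Int → Int → Int) (g : Int → Int)
    (h : ∀ r i, f r i = r + g i) :
    ∀ (l : List Int) (init : Int), l.foldl f init = init + (l.map g).sum := by
  intro l
  induction l with
  | nil => intro init; simp
  | cons x xs ih => intro init; simp [List.foldl_cons, ih, h]; ring

lemma solve_eq_sum (n : Int) (d_list : List Int) :
    solve n d_list = ((PySem.List.pyRange 1 (n + 1) 1).map (contribA d_list)).sum := by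
  unfold solve
  rw [foldl_eq_sum_map _ (contribA d_list)]
  · simp
  · intro r i
    simp only [contribA]
    split_ifs <;> ring

lemma solve_alt_eq_sum (n : Int) (d_list : List Int) :
    solve_alt n d_list =
      ((PySem.List.pyRange 1 (min n 9 + 1) 1).map (contribB1 d_list)).sum +
      ((PySem.List.pyRange 1 (PySem.Int.floordiv n 11 + 1) 1).map (contribB2 d_list)).sum := by
  unfold solve_alt
  rw [foldl_eq_sum_map _ (contribB2 d_list)]
  · rw [foldl_eq_sum_map _ (contribB1 d_list)]
    · ring
    · intro r i; simp only [contribB1]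
  · intro r j; simp only [contribB2]

lemma floordiv_cast (m : Nat) : PySem.Int.floordiv (m : Int) 11 = (m : Int) / 11 :=
  PySem.Int.floordiv_eq_ediv_of_pos (by norm_num)

lemma main_nat (d_list : List Int) : ∀ (m : Nat),
    ((PySem.List.pyRange 1 ((m : Int) + 1) 1).map (contribA d_list)).sum =
      ((PySem.List.pyRange 1 (min (m : Int) 9 + 1) 1).map (contribB1 d_list)).sum +
      ((PySem.List.pyRange 1 (PySem.Int.floordiv (m : Int) 11 + 1) 1).map (contribB2 d_list)).sum := by
  intro m
  induction m with
  | zero =>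
      simp [PySem.List.pyRange_one_eq_nil]
  | succ m ih =>
      have hsucc : ((m + 1 : Nat) : Int) = (m : Int) + 1 := by push_cast; ring
      have hq1 : PySem.Int.floordiv ((m : Int) + 1) 11 = ((m : Int) + 1) / 11 := by
        rw [← hsucc, floordiv_cast]
      have hq0 : PySem.Int.floordiv (m : Int) 11 = (m : Int) / 11 := floordiv_cast m
      rw [hsucc]
      rw [PySem.List.pyRange_one_succ_right (a := 1) (b := (m : Int) + 1) (by omega)]
      rw [List.map_append, List.sum_append]
      rw [ih]
      simp only [List.map_cons, List.map_nil, List.sum_cons, List.sum_nil]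
      by_cases h9 : (m : Int) + 1 <= 9
      · -- the new index lands in B's first loop; the quotient range is unchanged (both empty)
        have hmin1 : min ((m : Int) + 1) 9 = (m : Int) + 1 := by omega
        have hmin0 : min (m : Int) 9 = (m : Int) := by omega
        have hz1 : PySem.Int.floordiv ((m : Int) + 1) 11 = 0 := by rw [hq1]; omega
        have hz0 : PySem.Int.floordiv (m : Int) 11 = 0 := by rw [hq0]; omega
        rw [hmin1, hmin0, hz1, hz0]
        rw [PySem.List.pyRange_one_succ_right (a := 1) (b := (m : Int) + 1) (by omega)]
        rw [List.map_append, List.sum_append]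
        simp only [List.map_cons, List.map_nil, List.sum_cons, List.sum_nil]
        have hc : contribA d_list ((m : Int) + 1) = contribB1 d_list ((m : Int) + 1) := by
          simp only [contribA, contribB1]
          rw [if_pos (show 1 <= (m : Int) + 1 ∧ (m : Int) + 1 <= 9 by omega)]
        rw [hc]; ring
      · -- i = m+1 >= 10: B's first loop is unchanged (min stays 9)
        have hmin1 : min ((m : Int) + 1) 9 = 9 := by omega
        have hmin0 : min (m : Int) 9 = 9 := by omega
        rw [hmin1, hmin0, hq1, hq0]
        by_cases hdvd : ((m : Int) + 1) % 11 = 0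
        · -- m+1 is a multiple of 11: B's second loop gains exactly the quotient j = (m+1)/11
          have hqs : ((m : Int) + 1) / 11 = (m : Int) / 11 + 1 := by omega
          rw [hqs]
          rw [PySem.List.pyRange_one_succ_right (a := 1) (b := (m : Int) / 11 + 1) (by omega)]
          rw [List.map_append, List.sum_append]
          simp only [List.map_cons, List.map_nil, List.sum_cons, List.sum_nil]
          have hc : contribA d_list ((m : Int) + 1) = contribB2 d_list ((m : Int) / 11 + 1) := by
            have hmod : PySem.Int.mod ((m : Int) + 1) 11 = 0 := by
              rw [PySem.Int.mod_eq_emod_of_pos (by norm_num)]; exact hdvd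
            have hidx : 11 * ((m : Int) / 11 + 1) - 1 = (m : Int) + 1 - 1 := by omega
            simp only [contribA, contribB2]
            rw [if_neg (show ¬(1 <= (m : Int) + 1 ∧ (m : Int) + 1 <= 9) by omega), if_pos hmod,
              hq1, hqs, hidx]
          rw [hc]; ring
        · -- not a multiple of 11 and >= 10: A's body contributes 0, both of B's ranges unchanged
          have hqs : ((m : Int) + 1) / 11 = (m : Int) / 11 := by omega
          rw [hqs]
          have hc : contribA d_list ((m : Int) + 1) = 0 := by
            have hmod : PySem.Int.mod ((m : Int) + 1) 11 ≠ 0 := by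
              rw [PySem.Int.mod_eq_emod_of_pos (by norm_num)]; exact hdvd
            simp only [contribA]
            rw [if_neg (show ¬(1 <= (m : Int) + 1 ∧ (m : Int) + 1 <= 9) by omega), if_neg hmod]
          rw [hc]; ring

lemma solve_eq_alt (n : Int) (d_list : List Int) : solve n d_list = solve_alt n d_list := by
  rw [solve_eq_sum, solve_alt_eq_sum]
  by_cases hn : 0 <= n
  · obtain ⟨m, rfl⟩ := Int.eq_ofNat_of_zero_le hn
    exact main_nat d_list m
  · have hfd : PySem.Int.floordiv n 11 < 1 := by
      have h := (PySem.Int.le_floordiv_iff_mul_le (a := n) (b := 11) (q := 1) (by norm_num))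
      by_contra hcon
      have : (1 : Int) * 11 <= n := h.mp (by omega)
      omega
    rw [PySem.List.pyRange_one_eq_nil (show n + 1 <= 1 by omega),
      PySem.List.pyRange_one_eq_nil (show min n 9 + 1 <= 1 by omega),
      PySem.List.pyRange_one_eq_nil (show PySem.Int.floordiv n 11 + 1 <= 1 by omega)]
    simp

-- ===== VERDICT (by name: the statement is the Claim_ definition above) =====
theorem solve_spec : Claim_equal_solve := by
  intro n d_list _ _
  exact solve_eq_alt n d_list
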